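-- pv_equiv track=rewrite | github.com/981377660LMT/algorithm-study | 11_动态规划/dp分类/区间dp/dfs/回文/中心扩展法求回文子串/中心扩展法.py | expand1
-- ===== SOURCE A (Python) =====
-- from typing import List, Tuple
--
-- def expand1(s: str) -> List[Tuple[int, int]]:
--     """中心扩展法求所有回文子串 O(n^2)"""
--
--     def expand(left: int, right: int):
--         while left >= 0 and right < n and s[left] == s[right]:
--             intervals.append((left, right))  # 长度为 right-left+1
--             left -= 1
--             right += 1
--
--     n = len(s)
--     intervals = []
--     for i in range(n):
--         expand(i, i)
--         expand(i, i + 1)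
--     return intervals
-- ===== SOURCE B (Python) =====
-- from typing import List, Tuple
--
-- def expand1(s: str) -> List[Tuple[int, int]]:
--     """Manacher: compute odd/even palindrome radii in linear passes using the
--     mirror of the rightmost known palindrome, then emit the intervals grouped
--     by center in the same order as naive center expansion."""
--     n = len(s)
--
--     d1 = []  # d1[i] = number of odd palindromes centered at i
--     l, r = 0, -1
--     for i in range(n):
--         k = 1 if i > r else min(d1[l + r - i], r - i + 1)
--         while i - k >= 0 and i + k < n and s[i - k] == s[i + k]:
--             k += 1
--         d1.append(k)
--         if i + k - 1 > r:
--             l, r = i - k + 1, i + k - 1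
--
--     d2 = []  # d2[i] = number of even palindromes centered between i and i+1
--     l, r = 0, -1
--     for i in range(n):
--         k = 0 if i >= r else min(d2[l + r - 1 - i], r - i)
--         while i - k >= 0 and i + 1 + k < n and s[i - k] == s[i + 1 + k]:
--             k += 1
--         d2.append(k)
--         if i + k > r:
--             l, r = i - k + 1, i + k
--
--     res = []
--     for i in range(n):
--         for j in range(d1[i]):
--             res.append((i - j, i + j))
--         for j in range(d2[i]):
--             res.append((i - j, i + 1 + j))
--     return res
-- ===== Notes on version B (the rewrite author's own statement) =====
-- stated objective: alternative
-- what changed: B computes each center's palindrome radius with Manacher's algorithm (two linear mirror-and-extend passes building radius arrays d1/d2) and then emits the intervals grouped by center, instead of re-expanding outward from every center while appending; A's total work and the emission step remain output-sized, so asymptotic cost is the same O(n + P) where P is the number of palindromic substrings.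
import Mathlib
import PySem

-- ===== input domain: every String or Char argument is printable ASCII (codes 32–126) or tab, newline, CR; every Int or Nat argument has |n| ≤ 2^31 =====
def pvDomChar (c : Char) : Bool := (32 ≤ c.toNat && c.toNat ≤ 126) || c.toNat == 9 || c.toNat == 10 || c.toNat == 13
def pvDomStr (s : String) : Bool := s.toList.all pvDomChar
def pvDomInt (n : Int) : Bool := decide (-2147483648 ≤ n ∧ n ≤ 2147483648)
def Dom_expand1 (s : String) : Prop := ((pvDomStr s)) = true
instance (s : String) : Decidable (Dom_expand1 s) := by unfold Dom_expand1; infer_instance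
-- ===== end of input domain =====

-- B replaces A's per-center re-expansion by Manacher's mirror-and-extend passes (alternative algorithm, same output order).

-- ===== PORT A =====
-- the inner 'expand(left, right)' while-loop of A
def expand1Loop (s : String) (n left right : Int) (acc : List (Int × Int)) : List (Int × Int) :=
  if h : 0 ≤ left ∧ right < n ∧ PySem.Str.pyGet? s left = PySem.Str.pyGet? s right then
    expand1Loop s n (left - 1) (right + 1) (acc ++ [(left, right)])
  else acc
termination_by (n - right).toNat
decreasing_by have := h.2.1; omega

def expand1 (s : String) : List (Int × Int) :=
  (PySem.List.pyRange 0 (PySem.Str.len s) 1).foldl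
    (fun acc i =>
      expand1Loop s (PySem.Str.len s) i (i + 1) (expand1Loop s (PySem.Str.len s) i i acc)) []

-- ===== PORT B =====
-- the 'while' extension of Manacher's odd pass (Source B)
def extOdd (s : String) (n i k : Int) : Int :=
  if h : 0 ≤ i - k ∧ i + k < n ∧ PySem.Str.pyGet? s (i - k) = PySem.Str.pyGet? s (i + k) then
    extOdd s n i (k + 1)
  else k
termination_by (n - (i + k)).toNat
decreasing_by have := h.2.1; omega

-- the 'while' extension of Manacher's even pass (Source B)
def extEven (s : String) (n i k : Int) : Int :=
  if h : 0 ≤ i - k ∧ i + 1 + k < n ∧ PySem.Str.pyGet? s (i - k) = PySem.Str.pyGet? s (i + 1 + k) then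
    extEven s n i (k + 1)
  else k
termination_by (n - (i + 1 + k)).toNat
decreasing_by have := h.2.1; omega

-- one iteration of the odd pass: state (d1, l, r); pyGetD is exact here — the index is proved in range below
def oddStep (s : String) (n : Int) (st : List Int × Int × Int) (i : Int) : List Int × Int × Int :=
  let k := extOdd s n i
    (if i > st.2.2 then 1
     else min (PySem.List.pyGetD st.1 (st.2.1 + st.2.2 - i) 0) (st.2.2 - i + 1))
  (st.1 ++ [k], if i + k - 1 > st.2.2 then (i - k + 1, i + k - 1) else (st.2.1, st.2.2))

-- one iteration of the even pass
def evenStep (s : String) (n : Int) (st : List Int × Int × Int) (i : Int) : List Int × Int × Int :=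
  let k := extEven s n i
    (if i ≥ st.2.2 then 0
     else min (PySem.List.pyGetD st.1 (st.2.1 + st.2.2 - 1 - i) 0) (st.2.2 - i))
  (st.1 ++ [k], if i + k > st.2.2 then (i - k + 1, i + k) else (st.2.1, st.2.2))

def expand1_alt (s : String) : List (Int × Int) :=
  let n := PySem.Str.len s
  let d1 := ((PySem.List.pyRange 0 n 1).foldl (oddStep s n) ([], 0, -1)).1
  let d2 := ((PySem.List.pyRange 0 n 1).foldl (evenStep s n) ([], 0, -1)).1
  (PySem.List.pyRange 0 n 1).foldl (fun acc i =>
    (PySem.List.pyRange 0 (PySem.List.pyGetD d2 i 0) 1).foldl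
      (fun a j => a ++ [(i - j, i + 1 + j)])
      ((PySem.List.pyRange 0 (PySem.List.pyGetD d1 i 0) 1).foldl
        (fun a j => a ++ [(i - j, i + j)]) acc)) []

-- ===== PRECONDITION & SPEC =====
def Spec_expand1 (s : String) (out : List (Int × Int)) : Prop := out = expand1_alt s
instance (s : String) (out : List (Int × Int)) : Decidable (Spec_expand1 s out) := by unfold Spec_expand1; infer_instance

-- ===== CLAIM (what is proved, stated in full; the proofs are below) =====
def Claim_equal_expand1 : Prop := ∀ (s : String), Dom_expand1 s → Spec_expand1 s (expand1 s)

-- ===== LEMMAS AND PROOFS =====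

-- the while-condition of A's expand at a given (left, right)
def pvCnd (s : String) (n a b : Int) : Prop :=
  0 ≤ a ∧ b < n ∧ PySem.Str.pyGet? s a = PySem.Str.pyGet? s b

-- number of iterations of A's expand loop started at (a, b)
def fCnt (s : String) (n a b : Int) : Nat :=
  if h : 0 ≤ a ∧ b < n ∧ PySem.Str.pyGet? s a = PySem.Str.pyGet? s b then
    fCnt s n (a - 1) (b + 1) + 1
  else 0
termination_by (n - b).toNat
decreasing_by have := h.2.1; omega

-- s[l..r] is a palindrome (as Option values, index-by-index)
def pvPal (s : String) (l r : Int) : Prop :=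
  ∀ x : Int, 0 ≤ x → x ≤ r - l → PySem.Str.pyGet? s (l + x) = PySem.Str.pyGet? s (r - x)

-- odd-pass invariant, holding before index i is processed
def OddInv (s : String) (n : Int) (i : Nat) (st : List Int × Int × Int) : Prop :=
  st.1 = (List.range i).map (fun (j : Nat) => (fCnt s n (j : Int) (j : Int) : Int)) ∧
  0 ≤ st.2.1 ∧ st.2.2 < n ∧ pvPal s st.2.1 st.2.2 ∧
  ((st.2.1 = 0 ∧ st.2.2 = -1) ∨ st.2.1 + st.2.2 ≤ 2 * (i : Int) - 2)

-- even-pass invariant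
def EvenInv (s : String) (n : Int) (i : Nat) (st : List Int × Int × Int) : Prop :=
  st.1 = (List.range i).map (fun (j : Nat) => (fCnt s n (j : Int) ((j : Int) + 1) : Int)) ∧
  0 ≤ st.2.1 ∧ st.2.2 < n ∧ pvPal s st.2.1 st.2.2 ∧
  ((st.2.1 = 0 ∧ st.2.2 = -1) ∨ st.2.1 + st.2.2 ≤ 2 * (i : Int) - 1)

theorem expand1Loop_eq (s : String) (n a b : Int) (acc : List (Int × Int)) :
    expand1Loop s n a b acc
      = acc ++ (List.range (fCnt s n a b)).map (fun (j : Nat) => (a - (j : Int), b + (j : Int))) := by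
  fun_induction expand1Loop s n a b acc with
  | case1 a b acc h ih =>
    rw [fCnt, dif_pos h, ih, List.range_succ_eq_map, List.map_cons, List.map_map]
    simp only [Nat.cast_zero, sub_zero, add_zero, List.append_assoc, List.singleton_append]
    refine congrArg _ (congrArg _ (List.map_congr_left ?_))
    intro j hj
    simp only [Function.comp_apply, Prod.mk.injEq]
    push_cast
    constructor <;> ring
  | case2 a b acc h =>
    rw [fCnt, dif_neg h]
    simp

theorem fCnt_lt (s : String) (n a b : Int) :
    ∀ t : Nat, t < fCnt s n a b → pvCnd s n (a - (t : Int)) (b + (t : Int)) := by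
  fun_induction fCnt s n a b with
  | case1 a b h ih =>
    intro t ht
    match t with
    | 0 => simpa [pvCnd] using h
    | (t + 1) =>
      have h2 := ih t (by omega)
      have e1 : a - ((t + 1 : Nat) : Int) = a - 1 - (t : Int) := by push_cast; ring
      have e2 : b + ((t + 1 : Nat) : Int) = b + 1 + (t : Int) := by push_cast; ring
      rw [e1, e2]; exact h2
  | case2 a b h =>
    intro t ht
    omega

theorem fCnt_fail (s : String) (n a b : Int) :
    ¬ pvCnd s n (a - (fCnt s n a b : Int)) (b + (fCnt s n a b : Int)) := by
  fun_induction fCnt s n a b with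
  | case1 a b h ih =>
    have e1 : a - ((fCnt s n (a - 1) (b + 1) + 1 : Nat) : Int)
        = a - 1 - (fCnt s n (a - 1) (b + 1) : Int) := by push_cast; ring
    have e2 : b + ((fCnt s n (a - 1) (b + 1) + 1 : Nat) : Int)
        = b + 1 + (fCnt s n (a - 1) (b + 1) : Int) := by push_cast; ring
    rw [e1, e2]; exact ih
  | case2 a b h =>
    simpa [pvCnd] using h

theorem fCnt_ge (s : String) (n a b : Int) (m : Int) (h0 : 0 ≤ m)
    (hall : ∀ t : Nat, (t : Int) < m → pvCnd s n (a - (t : Int)) (b + (t : Int))) :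
    m ≤ (fCnt s n a b : Int) := by
  by_contra hcon
  have hcon' : ((fCnt s n a b : Nat) : Int) < m := by omega
  exact fCnt_fail s n a b (hall (fCnt s n a b) hcon')

theorem fCnt_pos (s : String) (n i : Int) (h0 : 0 ≤ i) (hn : i < n) :
    1 ≤ (fCnt s n i i : Int) := by
  refine fCnt_ge s n i i 1 (by omega) ?_
  intro t ht
  have ht0 : t = 0 := by omega
  subst ht0
  refine ⟨by simpa using h0, by simpa using hn, ?_⟩
  norm_num

theorem extOdd_eq (s : String) (n i : Int) :
    ∀ k : Int, 0 ≤ k → k ≤ (fCnt s n i i : Int) → extOdd s n i k = (fCnt s n i i : Int) := by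
  suffices H : ∀ d : Nat, ∀ k : Int, 0 ≤ k → k ≤ (fCnt s n i i : Int) →
      ((fCnt s n i i : Int) - k).toNat = d → extOdd s n i k = (fCnt s n i i : Int) by
    intro k h1 h2
    exact H _ k h1 h2 rfl
  intro d
  induction d with
  | zero =>
    intro k h1 h2 hd
    have hk : k = (fCnt s n i i : Int) := by omega
    have hfail : ¬ (0 ≤ i - k ∧ i + k < n ∧
        PySem.Str.pyGet? s (i - k) = PySem.Str.pyGet? s (i + k)) := by
      rw [hk]; exact fCnt_fail s n i i
    rw [extOdd, dif_neg hfail]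
    exact hk
  | succ d ih =>
    intro k h1 h2 hd
    by_cases hk : k = (fCnt s n i i : Int)
    · have hfail : ¬ (0 ≤ i - k ∧ i + k < n ∧
          PySem.Str.pyGet? s (i - k) = PySem.Str.pyGet? s (i + k)) := by
        rw [hk]; exact fCnt_fail s n i i
      rw [extOdd, dif_neg hfail]
      exact hk
    · have hlt : k < (fCnt s n i i : Int) := by omega
      have hc := fCnt_lt s n i i k.toNat (by omega)
      rw [show ((k.toNat : Nat) : Int) = k by omega] at hc
      unfold pvCnd at hc
      rw [extOdd, dif_pos hc]
      exact ih (k + 1) (by omega) (by omega) (by omega)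

theorem extEven_eq (s : String) (n i : Int) :
    ∀ k : Int, 0 ≤ k → k ≤ (fCnt s n i (i + 1) : Int) →
      extEven s n i k = (fCnt s n i (i + 1) : Int) := by
  suffices H : ∀ d : Nat, ∀ k : Int, 0 ≤ k → k ≤ (fCnt s n i (i + 1) : Int) →
      ((fCnt s n i (i + 1) : Int) - k).toNat = d → extEven s n i k = (fCnt s n i (i + 1) : Int) by
    intro k h1 h2
    exact H _ k h1 h2 rfl
  intro d
  induction d with
  | zero =>
    intro k h1 h2 hd
    have hk : k = (fCnt s n i (i + 1) : Int) := by omega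
    have hfail : ¬ (0 ≤ i - k ∧ i + 1 + k < n ∧
        PySem.Str.pyGet? s (i - k) = PySem.Str.pyGet? s (i + 1 + k)) := by
      rw [hk]
      exact fCnt_fail s n i (i + 1)
    rw [extEven, dif_neg hfail]
    exact hk
  | succ d ih =>
    intro k h1 h2 hd
    by_cases hk : k = (fCnt s n i (i + 1) : Int)
    · have hfail : ¬ (0 ≤ i - k ∧ i + 1 + k < n ∧
          PySem.Str.pyGet? s (i - k) = PySem.Str.pyGet? s (i + 1 + k)) := by
        rw [hk]
        exact fCnt_fail s n i (i + 1)
      rw [extEven, dif_neg hfail]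
      exact hk
    · have hlt : k < (fCnt s n i (i + 1) : Int) := by omega
      have hc := fCnt_lt s n i (i + 1) k.toNat (by omega)
      rw [show ((k.toNat : Nat) : Int) = k by omega] at hc
      unfold pvCnd at hc
      rw [extEven, dif_pos hc]
      exact ih (k + 1) (by omega) (by omega) (by omega)

theorem mirror_odd (s : String) (n l r i : Int) (hl : 0 ≤ l) (hrn : r < n)
    (hpal : pvPal s l r) (hir : i ≤ r) (hlr : l + r ≤ 2 * i - 2) :
    min ((fCnt s n (l + r - i) (l + r - i) : Int)) (r - i + 1) ≤ (fCnt s n i i : Int) := by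
  refine fCnt_ge s n i i _ (le_min (Int.natCast_nonneg _) (by omega)) ?_
  intro t ht
  have ht1 : (t : Int) < (fCnt s n (l + r - i) (l + r - i) : Int) := lt_of_lt_of_le ht (min_le_left _ _)
  have ht2 : (t : Int) ≤ r - i := by
    have := lt_of_lt_of_le ht (min_le_right _ _); omega
  have htn : t < fCnt s n (l + r - i) (l + r - i) := by exact_mod_cast ht1
  have hil : l + 2 ≤ i := by omega
  have ht0 : (0 : Int) ≤ (t : Int) := Int.natCast_nonneg _
  refine ⟨by omega, by omega, ?_⟩
  have e1 := hpal (i - (t : Int) - l) (by omega) (by omega)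
  rw [show l + (i - (t : Int) - l) = i - (t : Int) by ring,
      show r - (i - (t : Int) - l) = l + r - i + (t : Int) by ring] at e1
  have e2 := hpal (i + (t : Int) - l) (by omega) (by omega)
  rw [show l + (i + (t : Int) - l) = i + (t : Int) by ring,
      show r - (i + (t : Int) - l) = l + r - i - (t : Int) by ring] at e2
  have e3 := (fCnt_lt s n (l + r - i) (l + r - i) t htn).2.2
  calc PySem.Str.pyGet? s (i - (t : Int)) = PySem.Str.pyGet? s (l + r - i + (t : Int)) := e1
    _ = PySem.Str.pyGet? s (l + r - i - (t : Int)) := e3.symm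
    _ = PySem.Str.pyGet? s (i + (t : Int)) := e2.symm

theorem mirror_even (s : String) (n l r i : Int) (hl : 0 ≤ l) (hrn : r < n)
    (hpal : pvPal s l r) (hir : i < r) (hlr : l + r ≤ 2 * i - 1) :
    min ((fCnt s n (l + r - 1 - i) (l + r - i) : Int)) (r - i) ≤ (fCnt s n i (i + 1) : Int) := by
  refine fCnt_ge s n i (i + 1) _ (le_min (Int.natCast_nonneg _) (by omega)) ?_
  intro t ht
  have ht1 : (t : Int) < (fCnt s n (l + r - 1 - i) (l + r - i) : Int) :=
    lt_of_lt_of_le ht (min_le_left _ _)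
  have ht2 : (t : Int) ≤ r - i - 1 := by
    have := lt_of_lt_of_le ht (min_le_right _ _); omega
  have htn : t < fCnt s n (l + r - 1 - i) (l + r - i) := by exact_mod_cast ht1
  have hil : l + 2 ≤ i := by omega
  have ht0 : (0 : Int) ≤ (t : Int) := Int.natCast_nonneg _
  refine ⟨by omega, by omega, ?_⟩
  have e1 := hpal (i + 1 + (t : Int) - l) (by omega) (by omega)
  rw [show l + (i + 1 + (t : Int) - l) = i + 1 + (t : Int) by ring,
      show r - (i + 1 + (t : Int) - l) = l + r - 1 - i - (t : Int) by ring] at e1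
  have e2 := hpal (i - (t : Int) - l) (by omega) (by omega)
  rw [show l + (i - (t : Int) - l) = i - (t : Int) by ring,
      show r - (i - (t : Int) - l) = l + r - i + (t : Int) by ring] at e2
  have e3 := (fCnt_lt s n (l + r - 1 - i) (l + r - i) t htn).2.2
  calc PySem.Str.pyGet? s (i - (t : Int)) = PySem.Str.pyGet? s (l + r - i + (t : Int)) := e2
    _ = PySem.Str.pyGet? s (l + r - 1 - i - (t : Int)) := e3.symm
    _ = PySem.Str.pyGet? s (i + 1 + (t : Int)) := e1.symm

theorem pal_odd (s : String) (n i : Int) :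
    pvPal s (i - (fCnt s n i i : Int) + 1) (i + (fCnt s n i i : Int) - 1) := by
  intro x hx0 hx1
  by_cases hc : x ≤ (fCnt s n i i : Int) - 1
  · have htv : (((fCnt s n i i : Int) - 1 - x).toNat : Int) = (fCnt s n i i : Int) - 1 - x := by
      omega
    have htn : ((fCnt s n i i : Int) - 1 - x).toNat < fCnt s n i i := by omega
    have h3 := (fCnt_lt s n i i _ htn).2.2
    rw [htv] at h3
    rw [show (i - (fCnt s n i i : Int) + 1) + x = i - ((fCnt s n i i : Int) - 1 - x) by ring,
        show (i + (fCnt s n i i : Int) - 1) - x = i + ((fCnt s n i i : Int) - 1 - x) by ring]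
    exact h3
  · have hb : x ≤ 2 * (fCnt s n i i : Int) - 2 := by
      have : (i + (fCnt s n i i : Int) - 1) - (i - (fCnt s n i i : Int) + 1)
          = 2 * (fCnt s n i i : Int) - 2 := by ring
      omega
    have htv : ((x - ((fCnt s n i i : Int) - 1)).toNat : Int) = x - ((fCnt s n i i : Int) - 1) := by
      omega
    have htn : (x - ((fCnt s n i i : Int) - 1)).toNat < fCnt s n i i := by omega
    have h3 := (fCnt_lt s n i i _ htn).2.2
    rw [htv] at h3
    rw [show (i - (fCnt s n i i : Int) + 1) + x = i + (x - ((fCnt s n i i : Int) - 1)) by ring,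
        show (i + (fCnt s n i i : Int) - 1) - x = i - (x - ((fCnt s n i i : Int) - 1)) by ring]
    exact h3.symm

theorem pal_even (s : String) (n i : Int) :
    pvPal s (i - (fCnt s n i (i + 1) : Int) + 1) (i + (fCnt s n i (i + 1) : Int)) := by
  intro x hx0 hx1
  by_cases hc : x ≤ (fCnt s n i (i + 1) : Int) - 1
  · have htv : (((fCnt s n i (i + 1) : Int) - 1 - x).toNat : Int)
        = (fCnt s n i (i + 1) : Int) - 1 - x := by omega
    have htn : ((fCnt s n i (i + 1) : Int) - 1 - x).toNat < fCnt s n i (i + 1) := by omega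
    have h3 := (fCnt_lt s n i (i + 1) _ htn).2.2
    rw [htv] at h3
    rw [show (i - (fCnt s n i (i + 1) : Int) + 1) + x
          = i - ((fCnt s n i (i + 1) : Int) - 1 - x) by ring,
        show (i + (fCnt s n i (i + 1) : Int)) - x
          = i + 1 + ((fCnt s n i (i + 1) : Int) - 1 - x) by ring]
    exact h3
  · have hb : x ≤ 2 * (fCnt s n i (i + 1) : Int) - 1 := by
      have : (i + (fCnt s n i (i + 1) : Int)) - (i - (fCnt s n i (i + 1) : Int) + 1)
          = 2 * (fCnt s n i (i + 1) : Int) - 1 := by ring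
      omega
    have htv : ((x - (fCnt s n i (i + 1) : Int)).toNat : Int)
        = x - (fCnt s n i (i + 1) : Int) := by omega
    have htn : (x - (fCnt s n i (i + 1) : Int)).toNat < fCnt s n i (i + 1) := by omega
    have h3 := (fCnt_lt s n i (i + 1) _ htn).2.2
    rw [htv] at h3
    rw [show (i - (fCnt s n i (i + 1) : Int) + 1) + x
          = i + 1 + (x - (fCnt s n i (i + 1) : Int)) by ring,
        show (i + (fCnt s n i (i + 1) : Int)) - x
          = i - (x - (fCnt s n i (i + 1) : Int)) by ring]
    exact h3.symm

theorem oddLoop_inv (s : String) (n : Int) (hn : 0 ≤ n) :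
    ∀ i : Nat, (i : Int) ≤ n →
      OddInv s n i ((PySem.List.pyRange 0 (i : Int) 1).foldl (oddStep s n) ([], 0, -1)) := by
  intro i
  induction i with
  | zero =>
    intro _
    simp only [Nat.cast_zero]
    rw [PySem.List.pyRange_one_eq_nil (le_refl 0)]
    simp only [List.foldl_nil]
    refine ⟨by simp, by show (0:Int) ≤ 0; norm_num, by show (-1:Int) < n; omega, ?_, Or.inl ⟨rfl, rfl⟩⟩
    show pvPal s 0 (-1)
    intro x h1 h2
    omega
  | succ i ih =>
    intro hle
    have hi0 : (0 : Int) ≤ (i : Int) := Int.natCast_nonneg i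
    have hi_n : (i : Int) < n := by push_cast at hle; omega
    have hinv := ih (by push_cast at hle ⊢; omega)
    push_cast
    rw [PySem.List.pyRange_one_succ_right (Int.natCast_nonneg i), List.foldl_append,
        List.foldl_cons, List.foldl_nil]
    rcases heq : (PySem.List.pyRange 0 (i : Int) 1).foldl (oddStep s n) ([], 0, -1)
      with ⟨d1, l, r⟩
    rw [heq] at hinv
    obtain ⟨hd, hl0, hrn, hpal, hdisj⟩ := hinv
    dsimp only at hd hl0 hrn hpal hdisj
    have hF1 : 1 ≤ (fCnt s n (i : Int) (i : Int) : Int) :=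
      fCnt_pos s n (i : Int) hi0 hi_n
    have hkey : extOdd s n (i : Int)
        (if ((i : Int) > r) then 1
         else min (PySem.List.pyGetD d1 (l + r - (i : Int)) 0) (r - (i : Int) + 1))
        = (fCnt s n (i : Int) (i : Int) : Int) := by
      by_cases hgt : (i : Int) > r
      · rw [if_pos hgt]
        exact extOdd_eq s n (i : Int) 1 (by omega) hF1
      · rw [if_neg hgt]
        have hlr2 : l + r ≤ 2 * (i : Int) - 2 := by
          rcases hdisj with ⟨hl1, hr1⟩ | h
          · exfalso; omega
          · exact h
        have hidx0 : 0 ≤ l + r - (i : Int) := by omega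
        have hidxi : l + r - (i : Int) < (i : Int) := by omega
        have hlen : d1.length = i := by rw [hd]; simp
        have hget : PySem.List.pyGetD d1 (l + r - (i : Int)) 0
            = (fCnt s n (l + r - (i : Int)) (l + r - (i : Int)) : Int) := by
          rw [hd, PySem.List.pyGetD_eq_getElem _ 0 hidx0
            (by simp only [List.length_map, List.length_range]; omega)]
          simp only [List.getElem_map, List.getElem_range]
          rw [Int.toNat_of_nonneg hidx0]
        rw [hget]
        refine extOdd_eq s n (i : Int) _ (le_min (Int.natCast_nonneg _) (by omega)) ?_
        exact mirror_odd s n l r (i : Int) hl0 hrn hpal (by omega) hlr2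
    simp only [oddStep]
    rw [hkey]
    by_cases hupd : (i : Int) + (fCnt s n (i : Int) (i : Int) : Int) - 1 > r
    · rw [if_pos hupd]
      have htn : fCnt s n (i : Int) (i : Int) - 1 < fCnt s n (i : Int) (i : Int) := by omega
      have hC := fCnt_lt s n (i : Int) (i : Int) _ htn
      unfold pvCnd at hC
      obtain ⟨hCa, hCb, -⟩ := hC
      have hcast : ((fCnt s n (i : Int) (i : Int) - 1 : Nat) : Int)
          = (fCnt s n (i : Int) (i : Int) : Int) - 1 := by omega
      rw [hcast] at hCa hCb
      refine ⟨?_, ?_, ?_, ?_, ?_⟩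
      · show d1 ++ [(fCnt s n (i : Int) (i : Int) : Int)]
            = (List.range (i + 1)).map (fun (j : Nat) => (fCnt s n (j : Int) (j : Int) : Int))
        rw [List.range_succ, List.map_append, hd]
        simp
      · show (0 : Int) ≤ (i : Int) - (fCnt s n (i : Int) (i : Int) : Int) + 1
        omega
      · show (i : Int) + (fCnt s n (i : Int) (i : Int) : Int) - 1 < n
        omega
      · show pvPal s ((i : Int) - (fCnt s n (i : Int) (i : Int) : Int) + 1)
            ((i : Int) + (fCnt s n (i : Int) (i : Int) : Int) - 1)
        exact pal_odd s n (i : Int)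
      · show ((i : Int) - (fCnt s n (i : Int) (i : Int) : Int) + 1 = 0 ∧
            (i : Int) + (fCnt s n (i : Int) (i : Int) : Int) - 1 = -1) ∨
            ((i : Int) - (fCnt s n (i : Int) (i : Int) : Int) + 1) +
              ((i : Int) + (fCnt s n (i : Int) (i : Int) : Int) - 1) ≤ 2 * ((i : Nat) + 1 : Nat) - 2
        right
        push_cast
        omega
    · rw [if_neg hupd]
      refine ⟨?_, ?_, ?_, ?_, ?_⟩
      · show d1 ++ [(fCnt s n (i : Int) (i : Int) : Int)]
            = (List.range (i + 1)).map (fun (j : Nat) => (fCnt s n (j : Int) (j : Int) : Int))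
        rw [List.range_succ, List.map_append, hd]
        simp
      · exact hl0
      · exact hrn
      · exact hpal
      · show (l = 0 ∧ r = -1) ∨ l + r ≤ 2 * ((i : Nat) + 1 : Nat) - 2
        rcases hdisj with h | h
        · exact Or.inl h
        · right
          push_cast
          omega

theorem evenLoop_inv (s : String) (n : Int) (hn : 0 ≤ n) :
    ∀ i : Nat, (i : Int) ≤ n →
      EvenInv s n i ((PySem.List.pyRange 0 (i : Int) 1).foldl (evenStep s n) ([], 0, -1)) := by
  intro i
  induction i with
  | zero =>
    intro _
    simp only [Nat.cast_zero]
    rw [PySem.List.pyRange_one_eq_nil (le_refl 0)]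
    simp only [List.foldl_nil]
    refine ⟨by simp, by show (0:Int) ≤ 0; norm_num, by show (-1:Int) < n; omega, ?_, Or.inl ⟨rfl, rfl⟩⟩
    show pvPal s 0 (-1)
    intro x h1 h2
    omega
  | succ i ih =>
    intro hle
    have hi0 : (0 : Int) ≤ (i : Int) := Int.natCast_nonneg i
    have hi_n : (i : Int) < n := by push_cast at hle; omega
    have hinv := ih (by push_cast at hle ⊢; omega)
    push_cast
    rw [PySem.List.pyRange_one_succ_right (Int.natCast_nonneg i), List.foldl_append,
        List.foldl_cons, List.foldl_nil]
    rcases heq : (PySem.List.pyRange 0 (i : Int) 1).foldl (evenStep s n) ([], 0, -1)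
      with ⟨d2, l, r⟩
    rw [heq] at hinv
    obtain ⟨hd, hl0, hrn, hpal, hdisj⟩ := hinv
    dsimp only at hd hl0 hrn hpal hdisj
    have hF0 : 0 ≤ (fCnt s n (i : Int) ((i : Int) + 1) : Int) := Int.natCast_nonneg _
    have hkey : extEven s n (i : Int)
        (if ((i : Int) ≥ r) then 0
         else min (PySem.List.pyGetD d2 (l + r - 1 - (i : Int)) 0) (r - (i : Int)))
        = (fCnt s n (i : Int) ((i : Int) + 1) : Int) := by
      by_cases hge : (i : Int) ≥ r
      · rw [if_pos hge]
        exact extEven_eq s n (i : Int) 0 (by omega) hF0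
      · rw [if_neg hge]
        have hlr2 : l + r ≤ 2 * (i : Int) - 1 := by
          rcases hdisj with ⟨hl1, hr1⟩ | h
          · exfalso; omega
          · exact h
        have hidx0 : 0 ≤ l + r - 1 - (i : Int) := by omega
        have hidxi : l + r - 1 - (i : Int) < (i : Int) := by omega
        have hlen : d2.length = i := by rw [hd]; simp
        have hget : PySem.List.pyGetD d2 (l + r - 1 - (i : Int)) 0
            = (fCnt s n (l + r - 1 - (i : Int)) ((l + r - 1 - (i : Int)) + 1) : Int) := by
          rw [hd, PySem.List.pyGetD_eq_getElem _ 0 hidx0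
            (by simp only [List.length_map, List.length_range]; omega)]
          simp only [List.getElem_map, List.getElem_range]
          rw [Int.toNat_of_nonneg hidx0]
        rw [hget, show (l + r - 1 - (i : Int)) + 1 = l + r - (i : Int) by ring]
        refine extEven_eq s n (i : Int) _ (le_min (Int.natCast_nonneg _) (by omega)) ?_
        exact mirror_even s n l r (i : Int) hl0 hrn hpal (by omega) hlr2
    simp only [evenStep]
    rw [hkey]
    by_cases hupd : (i : Int) + (fCnt s n (i : Int) ((i : Int) + 1) : Int) > r
    · rw [if_pos hupd]
      have hbd : (0 : Int) ≤ (i : Int) - (fCnt s n (i : Int) ((i : Int) + 1) : Int) + 1 ∧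
          (i : Int) + (fCnt s n (i : Int) ((i : Int) + 1) : Int) < n + 1 := by
        by_cases hz : fCnt s n (i : Int) ((i : Int) + 1) = 0
        · constructor <;> omega
        · have htn : fCnt s n (i : Int) ((i : Int) + 1) - 1 < fCnt s n (i : Int) ((i : Int) + 1) := by
            omega
          have hC := fCnt_lt s n (i : Int) ((i : Int) + 1) _ htn
          unfold pvCnd at hC
          obtain ⟨hCa, hCb, -⟩ := hC
          have hcast : ((fCnt s n (i : Int) ((i : Int) + 1) - 1 : Nat) : Int)
              = (fCnt s n (i : Int) ((i : Int) + 1) : Int) - 1 := by omega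
          rw [hcast] at hCa hCb
          constructor <;> omega
      refine ⟨?_, ?_, ?_, ?_, ?_⟩
      · show d2 ++ [(fCnt s n (i : Int) ((i : Int) + 1) : Int)]
            = (List.range (i + 1)).map (fun (j : Nat) => (fCnt s n (j : Int) ((j : Int) + 1) : Int))
        rw [List.range_succ, List.map_append, hd]
        simp
      · show (0 : Int) ≤ (i : Int) - (fCnt s n (i : Int) ((i : Int) + 1) : Int) + 1
        omega
      · show (i : Int) + (fCnt s n (i : Int) ((i : Int) + 1) : Int) < n
        -- strengthen: if F2 = 0 then r' = i < n; else from the matched pair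
        by_cases hz : fCnt s n (i : Int) ((i : Int) + 1) = 0
        · omega
        · have htn : fCnt s n (i : Int) ((i : Int) + 1) - 1 < fCnt s n (i : Int) ((i : Int) + 1) := by
            omega
          have hC := fCnt_lt s n (i : Int) ((i : Int) + 1) _ htn
          unfold pvCnd at hC
          obtain ⟨-, hCb, -⟩ := hC
          have hcast : ((fCnt s n (i : Int) ((i : Int) + 1) - 1 : Nat) : Int)
              = (fCnt s n (i : Int) ((i : Int) + 1) : Int) - 1 := by omega
          rw [hcast] at hCb
          omega
      · show pvPal s ((i : Int) - (fCnt s n (i : Int) ((i : Int) + 1) : Int) + 1)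
            ((i : Int) + (fCnt s n (i : Int) ((i : Int) + 1) : Int))
        exact pal_even s n (i : Int)
      · show ((i : Int) - (fCnt s n (i : Int) ((i : Int) + 1) : Int) + 1 = 0 ∧
            (i : Int) + (fCnt s n (i : Int) ((i : Int) + 1) : Int) = -1) ∨
            ((i : Int) - (fCnt s n (i : Int) ((i : Int) + 1) : Int) + 1) +
              ((i : Int) + (fCnt s n (i : Int) ((i : Int) + 1) : Int)) ≤ 2 * ((i : Nat) + 1 : Nat) - 1
        right
        push_cast
        omega
    · rw [if_neg hupd]
      refine ⟨?_, ?_, ?_, ?_, ?_⟩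
      · show d2 ++ [(fCnt s n (i : Int) ((i : Int) + 1) : Int)]
            = (List.range (i + 1)).map (fun (j : Nat) => (fCnt s n (j : Int) ((j : Int) + 1) : Int))
        rw [List.range_succ, List.map_append, hd]
        simp
      · exact hl0
      · exact hrn
      · exact hpal
      · show (l = 0 ∧ r = -1) ∨ l + r ≤ 2 * ((i : Nat) + 1 : Nat) - 1
        rcases hdisj with h | h
        · exact Or.inl h
        · right
          push_cast
          omega

-- ===== VERDICT (by name: the statement is the Claim_ definition above) =====
theorem expand1_spec : Claim_equal_expand1 := by
  intro s _
  show expand1 s = expand1_alt s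
  have hn0 : 0 ≤ PySem.Str.len s := by
    rw [PySem.Str.len_eq]; exact Int.natCast_nonneg _
  have hNn : (((PySem.Str.len s).toNat : Nat) : Int) = PySem.Str.len s := by omega
  have hod := oddLoop_inv s (PySem.Str.len s) hn0 (PySem.Str.len s).toNat (by omega)
  have hev := evenLoop_inv s (PySem.Str.len s) hn0 (PySem.Str.len s).toNat (by omega)
  rw [hNn] at hod hev
  obtain ⟨hd1, -, -, -, -⟩ := hod
  obtain ⟨hd2, -, -, -, -⟩ := hev
  unfold expand1 expand1_alt
  dsimp only
  refine PySem.List.foldl_congr_mem _ _ _ _ ?_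
  intro acc x hx
  rw [PySem.List.mem_pyRange_one] at hx
  obtain ⟨hx0, hxn⟩ := hx
  rw [expand1Loop_eq, expand1Loop_eq]
  rw [PySem.List.foldl_append_singleton_eq_map, PySem.List.foldl_append_singleton_eq_map]
  have hlook1 : PySem.List.pyGetD (((PySem.List.pyRange 0 (PySem.Str.len s) 1).foldl
      (oddStep s (PySem.Str.len s)) ([], 0, -1)).1) x 0
      = ((fCnt s (PySem.Str.len s) x x : Nat) : Int) := by
    rw [hd1, PySem.List.pyGetD_eq_getElem _ 0 hx0 (by simp only [List.length_map, List.length_range]; omega)]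
    simp only [List.getElem_map, List.getElem_range]
    rw [Int.toNat_of_nonneg hx0]
  have hlook2 : PySem.List.pyGetD (((PySem.List.pyRange 0 (PySem.Str.len s) 1).foldl
      (evenStep s (PySem.Str.len s)) ([], 0, -1)).1) x 0
      = ((fCnt s (PySem.Str.len s) x (x + 1) : Nat) : Int) := by
    rw [hd2, PySem.List.pyGetD_eq_getElem _ 0 hx0 (by simp only [List.length_map, List.length_range]; omega)]
    simp only [List.getElem_map, List.getElem_range]
    rw [Int.toNat_of_nonneg hx0]
  rw [hlook1, hlook2, PySem.List.pyRange_zero_natCast, PySem.List.pyRange_zero_natCast,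
      List.map_map, List.map_map]
  rfl
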